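-- pv_equiv track=rewrite | github.com/mstan/psxrecomp | scripts/find_missing_fallthrough_v4.py | get_last_meaningful_line
-- ===== SOURCE A (Python) =====
-- def get_last_meaningful_line(lines):
--     """Get the last meaningful statement (not boilerplate)."""
--     for line in reversed(lines):
--         stripped = line.strip()
--         if not stripped or stripped == '}' or stripped == '{':
--             continue
--         if stripped.startswith('//') or stripped.startswith('/*') or stripped.startswith('*'):
--             continue
--         if stripped == ';  /* label compatibility: C requires a statement after the last label */':
--             continue
--         if stripped.startswith('block_') and stripped.endswith(':'):
--             continue
--         if '/* nop */' in stripped: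
--             continue
--         return stripped
--     return '(empty)'
-- ===== SOURCE B (Python) =====
-- def get_last_meaningful_line(lines):
--     """Get the last meaningful statement (not boilerplate)."""
--     def meaningful(s):
--         if s in ('', '{', '}',
--                  ';  /* label compatibility: C requires a statement after the last label */'):
--             return False
--         if any(s.startswith(p) for p in ('//', '/*', '*')):
--             return False
--         if s.startswith('block_') and s.endswith(':'):
--             return False
--         return '/* nop */' not in s
--     kept = [s for s in (line.strip() for line in lines) if meaningful(s)]
--     return kept[-1] if kept else '(empty)'
-- ===== Notes on version B (the rewrite author's own statement) =====
-- stated objective: alternative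
-- what changed: Instead of a reverse scan with inline boilerplate tests and early return, B strips all lines, filters them through a predicate expressed via membership in a tuple of exact boilerplate strings and any() over a prefix tuple, and returns the last kept element (or '(empty)').
import Mathlib
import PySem

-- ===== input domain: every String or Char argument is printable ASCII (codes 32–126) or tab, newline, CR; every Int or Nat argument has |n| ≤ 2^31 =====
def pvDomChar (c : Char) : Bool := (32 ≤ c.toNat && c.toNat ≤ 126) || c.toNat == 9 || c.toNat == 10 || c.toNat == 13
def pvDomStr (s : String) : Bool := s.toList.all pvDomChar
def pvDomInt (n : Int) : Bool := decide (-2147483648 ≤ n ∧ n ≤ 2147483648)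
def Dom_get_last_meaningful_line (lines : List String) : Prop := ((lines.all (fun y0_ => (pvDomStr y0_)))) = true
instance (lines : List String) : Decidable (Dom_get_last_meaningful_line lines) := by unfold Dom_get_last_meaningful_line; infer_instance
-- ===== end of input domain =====

-- B replaces A's reverse scan with early return by strip-all / filter-by-predicate / take-last staged passes (alternative decomposition, same cost).


-- ===== PORT A =====
-- loop 'for line in reversed(lines)' with early return, as structural recursion over lines.reverse
def getLastGoA : List String → String
  | [] => "(empty)"
  | line :: rest =>
    let stripped := PySem.Str.strip line
    if stripped == "" || stripped == "}" || stripped == "{" then getLastGoA rest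
    else if PySem.Str.startswith stripped "//" || PySem.Str.startswith stripped "/*" ||
            PySem.Str.startswith stripped "*" then getLastGoA rest
    else if stripped == ";  /* label compatibility: C requires a statement after the last label */" then
      getLastGoA rest
    else if PySem.Str.startswith stripped "block_" && PySem.Str.endswith stripped ":" then
      getLastGoA rest
    else if PySem.Str.isIn "/* nop */" stripped then getLastGoA rest
    else stripped

def get_last_meaningful_line (lines : List String) : String :=
  getLastGoA lines.reverse

-- ===== PORT B =====
-- 'meaningful' predicate: membership in a tuple of exact boilerplate strings, any() over a prefix tuple
def pvMeaningful (s : String) : Bool :=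
  if ["", "{", "}",
      ";  /* label compatibility: C requires a statement after the last label */"].contains s then
    false
  else if ["//", "/*", "*"].any (fun p => PySem.Str.startswith s p) then
    false
  else if PySem.Str.startswith s "block_" && PySem.Str.endswith s ":" then
    false
  else
    !(PySem.Str.isIn "/* nop */" s)

-- strip all lines, keep the meaningful ones, take kept[-1] (or '(empty)' when empty)
def get_last_meaningful_line_alt (lines : List String) : String :=
  let kept := (lines.map PySem.Str.strip).filter pvMeaningful
  match kept.getLast? with
  | some s => s
  | none => "(empty)"

-- ===== PRECONDITION & SPEC =====
def Spec_get_last_meaningful_line (lines : List String) (out : String) : Prop := out = get_last_meaningful_line_alt lines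
instance (lines : List String) (out : String) : Decidable (Spec_get_last_meaningful_line lines out) := by unfold Spec_get_last_meaningful_line; infer_instance

-- ===== CLAIM =====
def Claim_equal_get_last_meaningful_line : Prop := ∀ (lines : List String), Dom_get_last_meaningful_line lines → Spec_get_last_meaningful_line lines (get_last_meaningful_line lines)

-- ===== LEMMAS AND PROOFS =====
-- A's inline boilerplate chain on one line agrees with B's predicate
lemma stepA (x : String) (rest : List String) :
    getLastGoA (x :: rest)
      = (if pvMeaningful (PySem.Str.strip x) then PySem.Str.strip x else getLastGoA rest) := by
  simp only [getLastGoA, pvMeaningful, List.contains_cons, List.any_cons, List.any_nil,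
    List.contains_nil]
  split_ifs <;> simp_all

-- A's reverse scan returns the head of the filtered stripped list
lemma goA_headD (ys : List String) :
    getLastGoA ys = ((ys.map PySem.Str.strip).filter pvMeaningful).headD "(empty)" := by
  induction ys with
  | nil => rfl
  | cons x rest ih =>
    rw [stepA]
    by_cases h : pvMeaningful (PySem.Str.strip x) <;> simp [h, ih]

-- ===== VERDICT =====
theorem get_last_meaningful_line_spec : Claim_equal_get_last_meaningful_line := by
  intro lines _
  unfold Spec_get_last_meaningful_line get_last_meaningful_line get_last_meaningful_line_alt
  rw [goA_headD, List.map_reverse, List.filter_reverse, List.headD_eq_head?_getD,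
    List.head?_reverse]
  show _ = (match ((lines.map PySem.Str.strip).filter pvMeaningful).getLast? with
    | some s => s | none => "(empty)")
  cases ((lines.map PySem.Str.strip).filter pvMeaningful).getLast? <;> rfl
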